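-- pv_equiv track=rewrite | github.com/fredporter/uDOS | core/graphics/block_graphics.py | create_checkerboard_pattern
-- ===== SOURCE A (Python) =====
-- from typing import List, Tuple, Optional
--
-- def create_checkerboard_pattern(
--     width: int, height: int, cell_size: int = 1
-- ) -> List[List[int]]:
--     """Create checkerboard pattern with sextant blocks"""
--     pattern = []
--     for y in range(height):
--         line = []
--         for x in range(width):
--             is_on = ((x // cell_size) + (y // cell_size)) % 2 == 0
--             mask = 0b111111 if is_on else 0b000000
--             line.append(mask)
--         pattern.append(line)
--     return pattern
-- ===== SOURCE B (Python) =====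
-- def create_checkerboard_pattern(width, height, cell_size=1):
--     """Create checkerboard pattern with sextant blocks.
--
--     Precomputes the two alternating row patterns once, then selects one
--     per row by the parity of y // cell_size (rows copied fresh)."""
--     if height <= 0:
--         return []
--     even_row = [0b111111 if (x // cell_size) % 2 == 0 else 0b000000
--                 for x in range(width)]
--     odd_row = [m ^ 0b111111 for m in even_row]
--     return [list(even_row) if (y // cell_size) % 2 == 0 else list(odd_row)
--             for y in range(height)]
-- ===== Notes on version B (the rewrite author's own statement) =====
-- stated objective: faster
-- what changed: B computes the mask per (x,y) only twice, not height times: it builds the even base row once, derives the odd row as its bitwise complement, and builds the grid by copying one of the two rows per y, instead of A's nested per-cell loop.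
-- outside the precondition, e.g. on create_checkerboard_pattern(0, 2, 0): A returns [[], []], B raises ZeroDivisionError
import Mathlib
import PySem

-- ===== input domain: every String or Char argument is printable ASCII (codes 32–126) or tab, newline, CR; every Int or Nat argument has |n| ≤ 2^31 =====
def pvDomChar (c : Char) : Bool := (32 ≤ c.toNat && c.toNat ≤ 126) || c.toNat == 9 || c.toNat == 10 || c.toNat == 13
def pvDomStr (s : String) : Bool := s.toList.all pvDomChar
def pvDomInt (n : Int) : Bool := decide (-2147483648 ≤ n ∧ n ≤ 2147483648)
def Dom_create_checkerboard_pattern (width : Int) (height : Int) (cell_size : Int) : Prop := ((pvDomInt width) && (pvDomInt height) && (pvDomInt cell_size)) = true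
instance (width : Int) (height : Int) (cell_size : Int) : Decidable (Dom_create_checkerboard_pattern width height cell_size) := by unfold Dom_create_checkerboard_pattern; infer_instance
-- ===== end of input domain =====

-- B precomputes the two alternating row patterns once (odd row = bitwise complement of the
-- even row) and selects one per row by the parity of y // cell_size, instead of A's
-- per-cell nested computation. Equivalence of RETURN values is proved on Pre_ below.

-- ===== PORT A =====
def create_checkerboard_pattern (width : Int) (height : Int) (cell_size : Int) : List (List Int) :=
  (PySem.List.pyRange 0 height 1).foldl
    (fun pattern y =>
      pattern ++
        [(PySem.List.pyRange 0 width 1).foldl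
          (fun line x =>
            line ++
              [if PySem.Int.mod (PySem.Int.floordiv x cell_size + PySem.Int.floordiv y cell_size) 2 = 0
               then (63 : Int) else 0]) []])
    []

-- ===== PORT B =====
def create_checkerboard_pattern_alt (width : Int) (height : Int) (cell_size : Int) : List (List Int) :=
  if height ≤ 0 then []
  else
    let even_row := (PySem.List.pyRange 0 width 1).map
      (fun x => if PySem.Int.mod (PySem.Int.floordiv x cell_size) 2 = 0 then (63 : Int) else 0)
    let odd_row := even_row.map (fun m => PySem.Int.bxor m 63)
    (PySem.List.pyRange 0 height 1).map
      (fun y => if PySem.Int.mod (PySem.Int.floordiv y cell_size) 2 = 0 then even_row else odd_row)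

-- ===== PRECONDITION & SPEC =====
-- Pre_ excludes cell_size = 0 with height > 0: the Python A raises ZeroDivisionError there
-- whenever width > 0, and when width = 0 its value [[],[],…] is an accident of the empty
-- inner loop skipping the division; B raises there.
def Pre_create_checkerboard_pattern (width : Int) (height : Int) (cell_size : Int) : Prop :=
  height ≤ 0 ∨ cell_size ≠ 0
instance (width : Int) (height : Int) (cell_size : Int) : Decidable (Pre_create_checkerboard_pattern width height cell_size) := by unfold Pre_create_checkerboard_pattern; infer_instance
def pvWitness_create_checkerboard_pattern : Int × Int × Int := (4, 3, 1)

def Spec_create_checkerboard_pattern (width : Int) (height : Int) (cell_size : Int) (out : List (List Int)) : Prop := out = create_checkerboard_pattern_alt width height cell_size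
instance (width : Int) (height : Int) (cell_size : Int) (out : List (List Int)) : Decidable (Spec_create_checkerboard_pattern width height cell_size out) := by unfold Spec_create_checkerboard_pattern; infer_instance

-- ===== CLAIM (what is proved, stated in full; the proofs are below) =====
def Claim_equal_create_checkerboard_pattern : Prop := ∀ (width : Int) (height : Int) (cell_size : Int), Dom_create_checkerboard_pattern width height cell_size → Pre_create_checkerboard_pattern width height cell_size → Spec_create_checkerboard_pattern width height cell_size (create_checkerboard_pattern width height cell_size)

-- ===== LEMMAS AND PROOFS =====

-- Snoc-fold is a map.
theorem pv_foldl_snoc {α β : Type} (f : α → β) (l : List α) (init : List β) :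
    l.foldl (fun acc x => acc ++ [f x]) init = init ++ l.map f := by
  induction l generalizing init with
  | nil => simp
  | cons a t ih => simp [List.foldl, ih]

-- Parity split of A's per-cell mask.
theorem pv_mask_split (a b : Int) :
    (if PySem.Int.mod (a + b) 2 = 0 then (63 : Int) else 0)
    = if PySem.Int.mod b 2 = 0
      then (if PySem.Int.mod a 2 = 0 then (63 : Int) else 0)
      else PySem.Int.bxor (if PySem.Int.mod a 2 = 0 then (63 : Int) else 0) 63 := by
  rw [PySem.Int.mod_eq_emod_of_pos (a := a + b) (by norm_num),
      PySem.Int.mod_eq_emod_of_pos (a := a) (by norm_num),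
      PySem.Int.mod_eq_emod_of_pos (a := b) (by norm_num)]
  split_ifs with h1 h2 h3 h4 h5 <;> first | rfl | omega

theorem create_checkerboard_pattern_eq_alt (width height cell_size : Int) :
    create_checkerboard_pattern width height cell_size
      = create_checkerboard_pattern_alt width height cell_size := by
  unfold create_checkerboard_pattern create_checkerboard_pattern_alt
  by_cases hh : height ≤ 0
  · simp [hh, PySem.List.pyRange_one_eq_nil hh]
  · simp only [hh, if_false]
    rw [pv_foldl_snoc]
    simp only [List.nil_append]
    apply List.map_congr_left
    intro y _
    rw [pv_foldl_snoc]
    simp only [List.nil_append, List.map_map]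
    by_cases hy : PySem.Int.mod (PySem.Int.floordiv y cell_size) 2 = 0
    · rw [if_pos hy]
      apply List.map_congr_left
      intro x _
      rw [pv_mask_split, if_pos hy]
    · rw [if_neg hy]
      apply List.map_congr_left
      intro x _
      rw [pv_mask_split, if_neg hy]; rfl

-- ===== VERDICT (by name: the statement is the Claim_ definition above) =====
theorem create_checkerboard_pattern_spec : Claim_equal_create_checkerboard_pattern := by
  intro width height cell_size _ _
  exact create_checkerboard_pattern_eq_alt width height cell_size
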